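-- pv_equiv track=rewrite | github.com/reige012/assignment-17 | answers/AndreMonc/task3.py | min_cuts
-- ===== SOURCE A (Python) =====
-- def min_cuts(enz_cut_sites, list_of_used_enzymes):
--     number_of_cuts = []
--     for single_cut_site_list in enz_cut_sites:
--         number_of_cuts.append(len(single_cut_site_list))
--     minval_cuts = min(number_of_cuts)
--     min_cut_indices = [ind for ind, val in enumerate(number_of_cuts) if val == minval_cuts]
--     elongated_minval_cuts = [minval_cuts]*(len(min_cut_indices))
--     min_cut_enzymes = []
--     for index in min_cut_indices:
--         min_cut_enzymes.append(list_of_used_enzymes[index])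
--     enz_cuts_dict_min = dict(zip(min_cut_enzymes, elongated_minval_cuts))
--     return enz_cuts_dict_min
-- ===== SOURCE B (Python) =====
-- def min_cuts(enz_cut_sites, list_of_used_enzymes):
--     min_val = None
--     result = {}
--     for i, sites in enumerate(enz_cut_sites):
--         n = len(sites)
--         if min_val is None or n < min_val:
--             min_val = n
--             result = {list_of_used_enzymes[i]: n}
--         elif n == min_val:
--             result[list_of_used_enzymes[i]] = n
--     return result
-- ===== Notes on version B (the rewrite author's own statement) =====
-- stated objective: simpler
-- what changed: B replaces A's five passes (lengths list, min, index filter, replicate, zip-into-dict) with one pass that maintains the running minimum and resets/extends the winners dict incrementally.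
import Mathlib
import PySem

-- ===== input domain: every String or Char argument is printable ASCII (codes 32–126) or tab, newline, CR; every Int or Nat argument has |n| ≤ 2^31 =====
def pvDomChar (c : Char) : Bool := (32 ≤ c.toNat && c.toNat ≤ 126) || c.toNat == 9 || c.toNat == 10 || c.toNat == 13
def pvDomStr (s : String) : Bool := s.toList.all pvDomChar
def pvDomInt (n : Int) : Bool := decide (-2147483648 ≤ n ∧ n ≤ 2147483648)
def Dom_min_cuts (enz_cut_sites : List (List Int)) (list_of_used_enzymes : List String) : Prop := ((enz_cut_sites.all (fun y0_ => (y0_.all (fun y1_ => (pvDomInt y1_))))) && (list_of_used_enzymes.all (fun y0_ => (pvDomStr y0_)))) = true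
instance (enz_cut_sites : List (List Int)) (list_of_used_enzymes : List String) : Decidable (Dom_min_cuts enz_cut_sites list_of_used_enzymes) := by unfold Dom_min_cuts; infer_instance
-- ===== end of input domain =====

-- B replaces A's five passes (lengths / min / filter / replicate / zip-to-dict) with one pass
-- maintaining the running minimum and the winners dict incrementally (objective: simpler).

-- ===== PORT A =====
def min_cuts (enz_cut_sites : List (List Int)) (list_of_used_enzymes : List String) : List (String × Int) :=
  let number_of_cuts : List Int :=
    enz_cut_sites.foldl (fun acc l => acc ++ [(l.length : Int)]) []
  match PySem.List.min? number_of_cuts (fun x => x) with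
  | none => []  -- min([]) raises ValueError in Python; excluded by Pre_min_cuts
  | some minval_cuts =>
    let min_cut_indices : List Int :=
      ((PySem.List.enumerate number_of_cuts).filter (fun p => p.2 == minval_cuts)).map (fun p => p.1)
    let elongated_minval_cuts : List Int := List.replicate min_cut_indices.length minval_cuts
    let min_cut_enzymes : List String :=
      min_cut_indices.foldl
        (fun acc i => acc ++ [((PySem.List.pyGet? list_of_used_enzymes i).getD "")]) []
        -- list_of_used_enzymes[index]: IndexError (pyGet? = none) excluded by Pre_min_cuts
    -- dict(zip(...)): insert the zipped pairs in order
    ((min_cut_enzymes.zip elongated_minval_cuts).foldl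
        (fun d p => d.insert p.1 p.2) (PySem.Dict.empty : PySem.Dict String Int)).items

-- ===== PORT B =====
-- the body of B's single for-loop (one iteration)
def min_cuts_alt_step (list_of_used_enzymes : List String)
    (st : Option Int × PySem.Dict String Int) (p : Int × List Int) :
    Option Int × PySem.Dict String Int :=
  let n : Int := (p.2.length : Int)
  match st.1 with
  | none =>
      (some n, (PySem.Dict.empty : PySem.Dict String Int).insert
        ((PySem.List.pyGet? list_of_used_enzymes p.1).getD "") n)
  | some m =>
      if n < m then
        (some n, (PySem.Dict.empty : PySem.Dict String Int).insert
          ((PySem.List.pyGet? list_of_used_enzymes p.1).getD "") n)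
      else if n = m then
        (some m, st.2.insert ((PySem.List.pyGet? list_of_used_enzymes p.1).getD "") n)
      else st

def min_cuts_alt (enz_cut_sites : List (List Int)) (list_of_used_enzymes : List String) : List (String × Int) :=
  ((PySem.List.enumerate enz_cut_sites).foldl (min_cuts_alt_step list_of_used_enzymes)
      (none, (PySem.Dict.empty : PySem.Dict String Int))).2.items

-- ===== PRECONDITION & SPEC =====
-- Pre_ = exactly the inputs on which Python A returns: the list is nonempty (else ValueError) and
-- every index achieving the minimum length is a valid index into list_of_used_enzymes (else IndexError).
def Pre_min_cuts (enz_cut_sites : List (List Int)) (list_of_used_enzymes : List String) : Prop :=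
  enz_cut_sites ≠ [] ∧
  ∀ i, (hi : i < enz_cut_sites.length) →
    (∀ j, (hj : j < enz_cut_sites.length) → (enz_cut_sites[i]).length ≤ (enz_cut_sites[j]).length) →
    i < list_of_used_enzymes.length
instance (enz_cut_sites : List (List Int)) (list_of_used_enzymes : List String) : Decidable (Pre_min_cuts enz_cut_sites list_of_used_enzymes) := by unfold Pre_min_cuts; infer_instance

def pvWitness_min_cuts : List (List Int) × List String := ([[1, 2], [3]], ["EcoRI", "BamHI"])

def Spec_min_cuts (enz_cut_sites : List (List Int)) (list_of_used_enzymes : List String) (out : List (String × Int)) : Prop := out = min_cuts_alt enz_cut_sites list_of_used_enzymes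
instance (enz_cut_sites : List (List Int)) (list_of_used_enzymes : List String) (out : List (String × Int)) : Decidable (Spec_min_cuts enz_cut_sites list_of_used_enzymes out) := by unfold Spec_min_cuts; infer_instance

-- ===== CLAIM (what is proved, stated in full; the proofs are below) =====
def Claim_equal_min_cuts : Prop := ∀ (enz_cut_sites : List (List Int)) (list_of_used_enzymes : List String), Dom_min_cuts enz_cut_sites list_of_used_enzymes → Pre_min_cuts enz_cut_sites list_of_used_enzymes → Spec_min_cuts enz_cut_sites list_of_used_enzymes (min_cuts enz_cut_sites list_of_used_enzymes)

-- ===== LEMMAS AND PROOFS =====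

-- proof-only helpers
def pvName (enz : List String) (i : Int) : String := (PySem.List.pyGet? enz i).getD ""
def pvToLen (p : Int × List Int) : Int × Int := (p.1, (p.2.length : Int))
-- B's step, seen only through the index and the length
def pvBStep (enz : List String) (st : Option Int × PySem.Dict String Int) (q : Int × Int) :
    Option Int × PySem.Dict String Int :=
  match st.1 with
  | none => (some q.2, (PySem.Dict.empty : PySem.Dict String Int).insert (pvName enz q.1) q.2)
  | some m =>
      if q.2 < m then (some q.2, (PySem.Dict.empty : PySem.Dict String Int).insert (pvName enz q.1) q.2)
      else if q.2 = m then (some m, st.2.insert (pvName enz q.1) q.2)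
      else st
def pvMinFold (m₀ : Int) (qs : List (Int × Int)) : Int := qs.foldl (fun m q => min m q.2) m₀
def pvWinAcc (enz : List String) (m : Int) (d : PySem.Dict String Int) (qs : List (Int × Int)) :
    PySem.Dict String Int :=
  qs.foldl (fun d q => if q.2 = m then d.insert (pvName enz q.1) m else d) d

theorem pv_foldl_append_map {α β : Type} (f : α → β) :
    ∀ (l : List α) (acc : List β), l.foldl (fun acc x => acc ++ [f x]) acc = acc ++ l.map f := by
  intro l
  induction l with
  | nil => simp
  | cons x t ih => intro acc; simp [List.foldl_cons, ih]

theorem pv_map_toLen_enumerate :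
    ∀ (l : List (List Int)) (s : Int),
      (PySem.List.enumerate l s).map pvToLen
        = PySem.List.enumerate (l.map (fun x => (x.length : Int))) s := by
  intro l
  induction l with
  | nil => intro s; simp [PySem.List.enumerate_nil]
  | cons x t ih => intro s; simp [PySem.List.enumerate_cons, ih, pvToLen]

theorem pv_foldl_step_map (enz : List String) :
    ∀ (ps : List (Int × List Int)) (st : Option Int × PySem.Dict String Int),
      ps.foldl (min_cuts_alt_step enz) st = (ps.map pvToLen).foldl (pvBStep enz) st := by
  intro ps
  induction ps with
  | nil => intro st; rfl
  | cons p t ih =>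
      intro st
      simp only [List.foldl_cons, List.map_cons, ih]
      rfl

theorem pv_minFold_le : ∀ (qs : List (Int × Int)) (m₀ : Int), pvMinFold m₀ qs ≤ m₀ := by
  intro qs
  induction qs with
  | nil => intro m₀; simp [pvMinFold]
  | cons q t ih =>
      intro m₀
      calc pvMinFold m₀ (q :: t) = pvMinFold (min m₀ q.2) t := rfl
        _ ≤ min m₀ q.2 := ih _
        _ ≤ m₀ := min_le_left _ _

theorem pv_minFold_enumerate :
    ∀ (t : List Int) (s : Int) (m₀ : Int),
      pvMinFold m₀ (PySem.List.enumerate t s) = t.foldl min m₀ := by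
  intro t
  induction t with
  | nil => intro s m₀; simp [pvMinFold, PySem.List.enumerate_nil]
  | cons x r ih =>
      intro s m₀
      simp only [PySem.List.enumerate_cons, List.foldl_cons]
      exact ih _ _

theorem pv_bInv (enz : List String) :
    ∀ (qs : List (Int × Int)) (m₀ : Int) (d₀ : PySem.Dict String Int),
      qs.foldl (pvBStep enz) (some m₀, d₀)
        = (some (pvMinFold m₀ qs),
            if pvMinFold m₀ qs < m₀ then pvWinAcc enz (pvMinFold m₀ qs) PySem.Dict.empty qs
            else pvWinAcc enz m₀ d₀ qs) := by
  intro qs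
  induction qs with
  | nil =>
      intro m₀ d₀
      simp [pvMinFold, pvWinAcc]
  | cons q t ih =>
      intro m₀ d₀
      rcases lt_trichotomy q.2 m₀ with h | h | h
      · -- strictly smaller: reset
        have hstep : pvBStep enz (some m₀, d₀) q
            = (some q.2, (PySem.Dict.empty : PySem.Dict String Int).insert (pvName enz q.1) q.2) := by
          simp [pvBStep, h]
        have hmin : min m₀ q.2 = q.2 := min_eq_right h.le
        have hfold : pvMinFold m₀ (q :: t) = pvMinFold q.2 t := by
          simp [pvMinFold, List.foldl_cons, hmin]
        have hle : pvMinFold q.2 t ≤ q.2 := pv_minFold_le t q.2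
        rw [List.foldl_cons, hstep, ih, hfold]
        have houter : pvMinFold q.2 t < m₀ := by omega
        by_cases hμ : pvMinFold q.2 t < q.2
        · have hne : q.2 ≠ pvMinFold q.2 t := by omega
          rw [if_pos hμ, if_pos houter]
          simp [pvWinAcc, List.foldl_cons, hne]
        · have heq : pvMinFold q.2 t = q.2 := le_antisymm hle (not_lt.mp hμ)
          rw [if_neg hμ, if_pos houter, heq]
          simp [pvWinAcc, List.foldl_cons]
      · -- equal: insert into the current dict
        have hstep : pvBStep enz (some m₀, d₀) q
            = (some m₀, d₀.insert (pvName enz q.1) q.2) := by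
          simp [pvBStep, h]
        have hmin : min m₀ q.2 = m₀ := min_eq_left h.ge
        have hfold : pvMinFold m₀ (q :: t) = pvMinFold m₀ t := by
          simp [pvMinFold, List.foldl_cons, hmin]
        have hle : pvMinFold m₀ t ≤ m₀ := pv_minFold_le t m₀
        rw [List.foldl_cons, hstep, ih]
        by_cases hμ : pvMinFold m₀ t < m₀
        · have hne : q.2 ≠ pvMinFold m₀ t := by omega
          rw [if_pos hμ, hfold, if_pos hμ]
          simp [pvWinAcc, List.foldl_cons, hne]
        · rw [if_neg hμ, hfold, if_neg hμ]
          simp [pvWinAcc, List.foldl_cons, h]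
      · -- strictly larger: skip
        have hstep : pvBStep enz (some m₀, d₀) q = (some m₀, d₀) := by
          have h1 : ¬ q.2 < m₀ := by omega
          have h2 : q.2 ≠ m₀ := by omega
          simp [pvBStep, h1, h2]
        have hmin : min m₀ q.2 = m₀ := min_eq_left h.le
        have hfold : pvMinFold m₀ (q :: t) = pvMinFold m₀ t := by
          simp [pvMinFold, List.foldl_cons, hmin]
        have hle : pvMinFold m₀ t ≤ m₀ := pv_minFold_le t m₀
        rw [List.foldl_cons, hstep, ih]
        by_cases hμ : pvMinFold m₀ t < m₀
        · have hne : q.2 ≠ pvMinFold m₀ t := by omega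
          rw [if_pos hμ, hfold, if_pos hμ]
          simp [pvWinAcc, List.foldl_cons, hne]
        · have hne : q.2 ≠ m₀ := by omega
          rw [if_neg hμ, hfold, if_neg hμ]
          simp [pvWinAcc, List.foldl_cons, hne]

-- B's whole fold over a nonempty enumerated list builds exactly the winners dict of the global minimum
theorem pv_b_final (enz : List String) (n₀ : Int) (qtl : List (Int × Int)) :
    (((0, n₀) :: qtl).foldl (pvBStep enz) (none, (PySem.Dict.empty : PySem.Dict String Int))).2
      = pvWinAcc enz (pvMinFold n₀ qtl) PySem.Dict.empty ((0, n₀) :: qtl) := by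
  have hstep : pvBStep enz (none, (PySem.Dict.empty : PySem.Dict String Int)) (0, n₀)
      = (some n₀, (PySem.Dict.empty : PySem.Dict String Int).insert (pvName enz 0) n₀) := rfl
  rw [List.foldl_cons, hstep, pv_bInv]
  have hle : pvMinFold n₀ qtl ≤ n₀ := pv_minFold_le qtl n₀
  by_cases hμ : pvMinFold n₀ qtl < n₀
  · have hne : n₀ ≠ pvMinFold n₀ qtl := by omega
    rw [if_pos hμ]
    simp [pvWinAcc, List.foldl_cons, hne]
  · have heq : pvMinFold n₀ qtl = n₀ := le_antisymm hle (not_lt.mp hμ)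
    rw [if_neg hμ, heq]
    simp [pvWinAcc, List.foldl_cons]

theorem pv_winAcc_filter (enz : List String) (m : Int) :
    ∀ (qs : List (Int × Int)) (d : PySem.Dict String Int),
      pvWinAcc enz m d qs
        = (qs.filter (fun q => q.2 == m)).foldl (fun d q => d.insert (pvName enz q.1) m) d := by
  intro qs
  induction qs with
  | nil => intro d; rfl
  | cons q t ih =>
      intro d
      by_cases h : q.2 = m
      · simp [pvWinAcc, List.foldl_cons, h]
        exact ih _
      · simp [pvWinAcc, List.foldl_cons, h]
        exact ih d

theorem pv_zip_map_replicate (f : Int → String) (m : Int) :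
    ∀ (idxs : List Int),
      (idxs.map f).zip (List.replicate idxs.length m) = idxs.map (fun i => (f i, m)) := by
  intro idxs
  induction idxs with
  | nil => rfl
  | cons i t ih => simp [List.replicate_succ, ih]

-- ===== VERDICT (by name: the statement is the Claim_ definition above) =====
theorem min_cuts_spec : Claim_equal_min_cuts := by
  intro ecs enz _hdom hpre
  obtain ⟨hne, -⟩ := hpre
  cases ecs with
  | nil => exact absurd rfl hne
  | cons e tl =>
      show min_cuts (e :: tl) enz = min_cuts_alt (e :: tl) enz
      -- the lengths list
      set L : List Int := (e :: tl).map (fun x => (x.length : Int)) with hL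
      have hnum : (e :: tl).foldl (fun acc l => acc ++ [(l.length : Int)]) [] = L := by
        rw [pv_foldl_append_map]; simp [hL]
      -- the minimum value
      have hminq : PySem.List.min? L (fun x => x)
          = some ((tl.map (fun x => (x.length : Int))).foldl min (e.length : Int)) := by
        rw [hL]; simp [PySem.List.min?_id_cons]
      set m : Int := (tl.map (fun x => (x.length : Int))).foldl min (e.length : Int) with hm
      -- B's side
      have hB : min_cuts_alt (e :: tl) enz
          = (pvWinAcc enz m PySem.Dict.empty (PySem.List.enumerate L 0)).items := by
        unfold min_cuts_alt
        rw [pv_foldl_step_map, pv_map_toLen_enumerate, hL]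
        have henum : PySem.List.enumerate ((e :: tl).map (fun x => (x.length : Int))) 0
            = (0, (e.length : Int)) :: PySem.List.enumerate (tl.map (fun x => (x.length : Int))) 1 := by
          simp [PySem.List.enumerate_cons]
        rw [henum, pv_b_final, pv_minFold_enumerate, ← hm, ← henum]
      -- A's side
      have hA : min_cuts (e :: tl) enz
          = (pvWinAcc enz m PySem.Dict.empty (PySem.List.enumerate L 0)).items := by
        unfold min_cuts
        simp only [hnum, hminq]
        rw [pv_foldl_append_map]
        simp only [List.nil_append]
        rw [pv_zip_map_replicate (fun i => (PySem.List.pyGet? enz i).getD "") m]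
        simp only [List.foldl_map]
        rw [pv_winAcc_filter]
        simp only [pvName]
      rw [hA, hB]
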